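-- pv_equiv track=rewrite | github.com/CppChan/leetcode | medium/mediumCode/Array/PlaceToPutTheChair.py | compute
-- ===== SOURCE A (Python) =====
-- def compute(list):
-- 	if len(list)==1:return 0
-- 	sumlist,temp,sum= [0]*len(list),0,0
-- 	for i in range(len(list)):
-- 		sum+=i*list[i]
-- 		temp+=list[i]
-- 		sumlist[i] = temp
-- 	temp, res, index= sum, sum,0
-- 	for i in range(1,len(list)):
-- 		temp = temp+sumlist[i-1]*2-sumlist[-1]
-- 		if temp<res:
-- 			res = temp
-- 			index = i
-- 	return index
-- ===== SOURCE B (Python) =====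
-- def compute(list):
--     def cost(i):
--         return sum(abs(i - j) * v for j, v in enumerate(list))
--     return min(range(len(list)), key=cost, default=0)
-- ===== Notes on version B (the rewrite author's own statement) =====
-- stated objective: simpler
-- what changed: A builds a prefix-sum array and updates a running cost incrementally while scanning for the argmin; B drops all prefix machinery and evaluates each index's weighted-distance cost directly by a brute-force inner sum, taking the earliest argmin with builtin min(range(n), key=cost).
import Mathlib
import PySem

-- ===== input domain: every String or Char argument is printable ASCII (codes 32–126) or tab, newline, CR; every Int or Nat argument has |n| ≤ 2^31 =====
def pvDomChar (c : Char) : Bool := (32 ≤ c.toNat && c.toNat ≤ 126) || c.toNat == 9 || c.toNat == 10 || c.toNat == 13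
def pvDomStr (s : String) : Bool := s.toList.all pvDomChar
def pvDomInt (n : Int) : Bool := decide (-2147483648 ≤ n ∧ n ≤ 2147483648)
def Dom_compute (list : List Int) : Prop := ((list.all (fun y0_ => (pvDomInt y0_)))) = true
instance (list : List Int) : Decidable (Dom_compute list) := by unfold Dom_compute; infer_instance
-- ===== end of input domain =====

-- B drops A's prefix-sum array and incremental cost update and instead evaluates each index's
-- weighted-distance cost directly (brute force) taking the earliest argmin with min; objective: simpler.

-- ===== PORT A =====
def compute (list : List Int) : Int :=
  if list.length == 1 then 0
  else
    -- first loop: sum += i*list[i]; temp += list[i]; sumlist[i] = temp   (state (sumlist, temp, sum))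
    let st1 := (PySem.List.pyRange 0 (list.length : Int) 1).foldl
      (fun st i =>
        (st.1.set i.toNat (st.2.1 + PySem.List.pyGetD list i 0),
         st.2.1 + PySem.List.pyGetD list i 0,
         st.2.2 + i * PySem.List.pyGetD list i 0))
      (List.replicate list.length (0 : Int), (0 : Int), (0 : Int))
    -- second loop: temp = temp + sumlist[i-1]*2 - sumlist[-1]   (state (res, index, temp))
    let st2 := (PySem.List.pyRange 1 (list.length : Int) 1).foldl
      (fun st i =>
        if st.2.2 + (PySem.List.pyGetD st1.1 (i - 1) 0) * 2 - PySem.List.pyGetD st1.1 (-1) 0 < st.1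
        then (st.2.2 + (PySem.List.pyGetD st1.1 (i - 1) 0) * 2 - PySem.List.pyGetD st1.1 (-1) 0, i,
              st.2.2 + (PySem.List.pyGetD st1.1 (i - 1) 0) * 2 - PySem.List.pyGetD st1.1 (-1) 0)
        else (st.1, st.2.1,
              st.2.2 + (PySem.List.pyGetD st1.1 (i - 1) 0) * 2 - PySem.List.pyGetD st1.1 (-1) 0))
      (st1.2.2, (0 : Int), st1.2.2)
    st2.2.1

-- ===== PORT B =====
-- cost(i) = sum(abs(i - j) * v for j, v in enumerate(list))
def computeCost (list : List Int) (i : Int) : Int :=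
  ((PySem.List.enumerate list).map (fun p => |i - p.1| * p.2)).sum

-- min(range(len(list)), key=cost, default=0)
def compute_alt (list : List Int) : Int :=
  PySem.List.minD (PySem.List.pyRange 0 (list.length : Int) 1) (computeCost list) 0

-- ===== PRECONDITION & SPEC =====
def Spec_compute (list : List Int) (out : Int) : Prop := out = compute_alt list
instance (list : List Int) (out : Int) : Decidable (Spec_compute list out) := by unfold Spec_compute; infer_instance

-- ===== CLAIM (what is proved, stated in full; the proofs are below) =====
def Claim_equal_compute : Prop := ∀ (list : List Int), Dom_compute list → Spec_compute list (compute list)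

-- ===== LEMMAS AND PROOFS =====

-- prefix sum of the first m weights
def tk (l : List Int) (m : Nat) : Int := (l.take m).sum
-- A's sumlist array after the first loop has processed [0, m)
def slAt (l : List Int) (m : Nat) : List Int :=
  (List.range l.length).map (fun k => if k < m then tk l (k + 1) else 0)
-- the cost of placing at index i, as a sum over positions
def costf (l : List Int) (i : Int) : Int :=
  ∑ j ∈ Finset.range l.length, |i - (j : Int)| * l.getD j 0
-- prefix weighted-position sum Σ_{k<m} k·l[k]
def wip (l : List Int) (m : Nat) : Int :=
  ((List.range m).map (fun (k : Nat) => (k : Int) * l.getD k 0)).sum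

theorem tk_succ (l : List Int) (m : Nat) : tk l (m + 1) = tk l m + l.getD m 0 := by
  rw [tk, tk, List.take_add_one, List.sum_append]
  cases h : l[m]? <;> simp [List.getD_eq_getElem?_getD, h]

theorem tk_range (l : List Int) (m : Nat) :
    tk l m = ∑ j ∈ Finset.range m, l.getD j 0 := by
  induction m with
  | zero => simp [tk]
  | succ m ih => rw [tk_succ, Finset.sum_range_succ, ih]

theorem sum_range_getD (l : List Int) :
    ∑ j ∈ Finset.range l.length, l.getD j 0 = l.sum := by
  rw [← tk_range, tk, List.take_length]

theorem loop1_inv (l : List Int) (m : Nat) (hm : m ≤ l.length) :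
    (PySem.List.pyRange 0 (m : Int) 1).foldl
      (fun st i =>
        (st.1.set i.toNat (st.2.1 + PySem.List.pyGetD l i 0),
         st.2.1 + PySem.List.pyGetD l i 0,
         st.2.2 + i * PySem.List.pyGetD l i 0))
      (List.replicate l.length (0 : Int), (0 : Int), (0 : Int))
    = (slAt l m, tk l m, wip l m) := by
  induction m with
  | zero =>
    have h0 : slAt l 0 = List.replicate l.length 0 := by
      apply List.ext_getElem <;> simp [slAt]
    rw [PySem.List.pyRange_one_eq_nil (by omega)]
    simp [h0, tk, wip]
  | succ m ih =>
    have hml : m < l.length := by omega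
    have hc : ((m + 1 : Nat) : Int) = (m : Int) + 1 := by push_cast; ring
    rw [hc, PySem.List.pyRange_one_succ_right (by positivity), List.foldl_append,
        ih (by omega)]
    simp only [List.foldl_cons, List.foldl_nil]
    rw [PySem.List.pyGetD_natCast]
    have hset : (slAt l m).set m (tk l m + l.getD m 0) = slAt l (m + 1) := by
      apply List.ext_getElem
      · simp [slAt]
      · intro i h1 h2
        simp only [slAt, List.getElem_set, List.getElem_map, List.getElem_range]
        by_cases him : m = i
        · subst him
          rw [if_pos rfl, if_pos (by omega : m < m + 1), ← tk_succ]
        · rw [if_neg him]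
          by_cases hi : i < m
          · rw [if_pos hi, if_pos (by omega : i < m + 1)]
          · rw [if_neg hi, if_neg (by omega : ¬ i < m + 1)]
    have htn : ((m : Int)).toNat = m := Int.toNat_natCast m
    rw [htn, hset, ← tk_succ]
    have : wip l m + (m : Int) * l.getD m 0 = wip l (m + 1) := by
      simp [wip, List.range_succ]
    rw [this]

theorem slAt_lookup (l : List Int) (k : Nat) (hk : k < l.length) :
    PySem.List.pyGetD (slAt l l.length) ((k : Int)) 0 = tk l (k + 1) := by
  rw [PySem.List.pyGetD_natCast]
  simp [slAt, List.getD_eq_getElem?_getD, hk]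

theorem slAt_last (l : List Int) (hl : 0 < l.length) :
    PySem.List.pyGetD (slAt l l.length) (-1) 0 = l.sum := by
  have hne : slAt l l.length ≠ [] := by
    simp only [slAt, ne_eq, List.map_eq_nil_iff, List.range_eq_nil]
    omega
  rw [PySem.List.pyGetD_neg_one _ 0 hne, List.getLast_eq_getElem]
  simp only [slAt, List.length_map, List.length_range, List.getElem_map, List.getElem_range]
  have h1 : l.length - 1 < l.length := by omega
  have h2 : l.length - 1 + 1 = l.length := by omega
  simp only [if_pos h1, h2, tk, List.take_length]

theorem sum_map_range (f : Nat → Int) (n : Nat) :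
    ((List.range n).map f).sum = ∑ j ∈ Finset.range n, f j := by
  induction n with
  | zero => simp
  | succ n ih => rw [List.range_succ, Finset.sum_range_succ, List.map_append, List.sum_append, ih]; simp

theorem cost_eq_costf (l : List Int) (i : Int) : computeCost l i = costf l i := by
  rw [computeCost, PySem.List.enumerate_eq_map_pyRange l 0, PySem.List.len_eq,
      PySem.List.pyRange_zero_natCast, List.map_map, List.map_map]
  simp only [Function.comp_def, PySem.List.pyGetD_natCast]
  rw [sum_map_range, costf]

theorem costf_zero (l : List Int) : costf l 0 = wip l l.length := by
  rw [wip, sum_map_range, costf]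
  apply Finset.sum_congr rfl
  intro j _
  have : |(0 : Int) - (j : Int)| = (j : Int) := by
    rw [zero_sub, abs_neg, abs_of_nonneg (by positivity)]
  rw [this]

theorem cost_step (l : List Int) (k : Nat) (hk : k < l.length) :
    costf l ((k : Int) + 1) = costf l (k : Int) + tk l (k + 1) * 2 - l.sum := by
  have hsplit : ∀ i : Int, costf l i =
      (∑ j ∈ Finset.range (k + 1), |i - (j : Int)| * l.getD j 0)
      + ∑ j ∈ Finset.Ico (k + 1) l.length, |i - (j : Int)| * l.getD j 0 := by
    intro i
    rw [costf, Finset.range_eq_Ico,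
        ← Finset.sum_Ico_consecutive _ (by omega : 0 ≤ k + 1) (by omega : k + 1 ≤ l.length),
        ← Finset.range_eq_Ico]
  rw [hsplit, hsplit]
  have h1 : ∀ j ∈ Finset.range (k + 1),
      |((k : Int) + 1) - (j : Int)| * l.getD j 0 = (((k : Int) + 1) - (j : Int)) * l.getD j 0 := by
    intro j hj
    rw [Finset.mem_range] at hj
    rw [abs_of_nonneg (by omega : (0 : Int) ≤ ((k : Int) + 1) - (j : Int))]
  have h2 : ∀ j ∈ Finset.range (k + 1),
      |(k : Int) - (j : Int)| * l.getD j 0 = ((k : Int) - (j : Int)) * l.getD j 0 := by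
    intro j hj
    rw [Finset.mem_range] at hj
    have hjk : (j : Int) ≤ (k : Int) := by exact_mod_cast Nat.lt_succ_iff.mp hj
    rw [abs_of_nonneg (by omega : (0 : Int) ≤ (k : Int) - (j : Int))]
  have h3 : ∀ j ∈ Finset.Ico (k + 1) l.length,
      |((k : Int) + 1) - (j : Int)| * l.getD j 0 = ((j : Int) - ((k : Int) + 1)) * l.getD j 0 := by
    intro j hj
    rw [Finset.mem_Ico] at hj
    have : ((k : Int) + 1) ≤ (j : Int) := by exact_mod_cast hj.1
    rw [abs_sub_comm, abs_of_nonneg (by omega : (0 : Int) ≤ (j : Int) - ((k : Int) + 1))]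
  have h4 : ∀ j ∈ Finset.Ico (k + 1) l.length,
      |(k : Int) - (j : Int)| * l.getD j 0 = ((j : Int) - (k : Int)) * l.getD j 0 := by
    intro j hj
    rw [Finset.mem_Ico] at hj
    have : (k : Int) + 1 ≤ (j : Int) := by exact_mod_cast hj.1
    rw [abs_sub_comm, abs_of_nonneg (by omega : (0 : Int) ≤ (j : Int) - (k : Int))]
  rw [Finset.sum_congr rfl h1, Finset.sum_congr rfl h2, Finset.sum_congr rfl h3,
      Finset.sum_congr rfl h4]
  have e1 : ∑ j ∈ Finset.range (k + 1), (((k : Int) + 1) - (j : Int)) * l.getD j 0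
      = (∑ j ∈ Finset.range (k + 1), ((k : Int) - (j : Int)) * l.getD j 0)
        + ∑ j ∈ Finset.range (k + 1), l.getD j 0 := by
    rw [← Finset.sum_add_distrib]
    apply Finset.sum_congr rfl
    intro j _
    ring
  have e2 : ∑ j ∈ Finset.Ico (k + 1) l.length, ((j : Int) - ((k : Int) + 1)) * l.getD j 0
      = (∑ j ∈ Finset.Ico (k + 1) l.length, ((j : Int) - (k : Int)) * l.getD j 0)
        - ∑ j ∈ Finset.Ico (k + 1) l.length, l.getD j 0 := by
    rw [← Finset.sum_sub_distrib]
    apply Finset.sum_congr rfl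
    intro j _
    ring
  have e3 : (∑ j ∈ Finset.range (k + 1), l.getD j 0)
      + ∑ j ∈ Finset.Ico (k + 1) l.length, l.getD j 0 = l.sum := by
    rw [← sum_range_getD, Finset.range_eq_Ico]
    exact Finset.sum_Ico_consecutive _ (by omega) (by omega)
  have e4 : tk l (k + 1) = ∑ j ∈ Finset.range (k + 1), l.getD j 0 := tk_range l (k + 1)
  rw [e1, e2, e4]
  omega

-- combined invariant for A's second loop and B's running min? fold
theorem loop2_inv (l : List Int) (k : Nat) (hk : k + 1 ≤ l.length) :
    ∃ j : Int,
      (PySem.List.pyRange 1 ((k + 1 : Nat) : Int) 1).foldl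
        (fun st i =>
          if st.2.2 + (PySem.List.pyGetD (slAt l l.length) (i - 1) 0) * 2
               - PySem.List.pyGetD (slAt l l.length) (-1) 0 < st.1
          then (st.2.2 + (PySem.List.pyGetD (slAt l l.length) (i - 1) 0) * 2
                  - PySem.List.pyGetD (slAt l l.length) (-1) 0, i,
                st.2.2 + (PySem.List.pyGetD (slAt l l.length) (i - 1) 0) * 2
                  - PySem.List.pyGetD (slAt l l.length) (-1) 0)
          else (st.1, st.2.1,
                st.2.2 + (PySem.List.pyGetD (slAt l l.length) (i - 1) 0) * 2
                  - PySem.List.pyGetD (slAt l l.length) (-1) 0))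
        (wip l l.length, (0 : Int), wip l l.length)
      = (costf l j, j, costf l (k : Int))
      ∧
      PySem.List.min? (PySem.List.pyRange 0 ((k + 1 : Nat) : Int) 1) (computeCost l) = some j := by
  induction k with
  | zero =>
    refine ⟨0, ?_, ?_⟩
    · rw [show ((0 + 1 : Nat) : Int) = 1 by norm_num,
          PySem.List.pyRange_one_eq_nil (le_refl 1)]
      simp [costf_zero]
    · rw [show PySem.List.pyRange 0 ((0 + 1 : Nat) : Int) 1 = [0] from rfl]
      simp [PySem.List.min?]
  | succ k ih =>
    obtain ⟨j, hA, hB⟩ := ih (by omega)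
    have hkn : k < l.length := by omega
    have hc : ((k + 1 + 1 : Nat) : Int) = ((k + 1 : Nat) : Int) + 1 := by push_cast; ring
    rw [hc, PySem.List.pyRange_one_succ_right (by push_cast; omega),
        PySem.List.pyRange_one_succ_right (by push_cast; omega)]
    simp only [PySem.List.min?] at hB ⊢
    simp only [List.foldl_append, List.foldl_cons, List.foldl_nil]
    rw [hA, hB]
    have hidx : ((k + 1 : Nat) : Int) - 1 = ((k : Nat) : Int) := by push_cast; ring
    rw [hidx, slAt_lookup l k hkn, slAt_last l (by omega)]
    have hcast : ((k + 1 : Nat) : Int) = (k : Int) + 1 := by push_cast; ring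
    simp only [cost_eq_costf, hcast]
    rw [← cost_step l k hkn]
    by_cases hlt : costf l ((k : Int) + 1) < costf l j
    · refine ⟨(k : Int) + 1, ?_, ?_⟩
      · rw [if_pos hlt]
      · simp only [if_pos hlt]
    · refine ⟨j, ?_, ?_⟩
      · rw [if_neg hlt]
      · simp only [if_neg hlt]

-- ===== VERDICT (by name: the statement is the Claim_ definition above) =====
theorem compute_spec : Claim_equal_compute := by
  intro l _
  show compute l = compute_alt l
  by_cases h0 : l.length = 0
  · have : l = [] := List.length_eq_zero_iff.mp h0
    subst this
    decide
  · obtain ⟨k, hk⟩ : ∃ k, l.length = k + 1 := ⟨l.length - 1, by omega⟩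
    obtain ⟨j, hA, hB⟩ := loop2_inv l k (by omega)
    have hcast : (l.length : Int) = ((k + 1 : Nat) : Int) := by rw [hk]
    have hBside : compute_alt l = j := by
      rw [compute_alt, PySem.List.minD, hcast, hB]
      rfl
    by_cases h1 : l.length = 1
    · have hk0 : k = 0 := by omega
      subst hk0
      have hj : j = 0 := by
        rw [show PySem.List.pyRange 0 ((0 + 1 : Nat) : Int) 1 = [0] from rfl] at hB
        simp [PySem.List.min?] at hB
        exact hB.symm
      rw [hBside, hj]
      simp [compute, h1]
    · rw [hBside]
      simp only [compute, beq_iff_eq, if_neg h1, loop1_inv l l.length (le_refl _)]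
      rw [hcast, hA]
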